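-- pv_equiv track=rewrite | github.com/JaspervB-tud/AmpliDiff | Scripts.py | calculate_degeneracy
-- ===== SOURCE A (Python) =====
-- def calculate_degeneracy(sequence):
--     '''
--     Function that returns the degeneracy of a sequence of nucleotides
--
--     Parameters
--     ----------
--     sequence : str
--         String representation of a series of consecutive nucleotides.
--
--     Returns
--     -------
--     res : int
--         Degeneracy of the input sequence.
--
--     '''
--     res = 1
--     for char in sequence:
--         if char in ['y', 'r', 's', 'w', 'm', 'k']:
--             res = res*2
--         elif char in ['b', 'd', 'h', 'v']:
--             res = res*3
--         elif char == 'n':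
--             res = res*4
--     return res
-- ===== SOURCE B (Python) =====
-- import collections
--
-- def calculate_degeneracy(sequence):
--     c = collections.Counter(sequence)
--     two = c['y'] + c['r'] + c['s'] + c['w'] + c['m'] + c['k']
--     three = c['b'] + c['d'] + c['h'] + c['v']
--     four = c['n']
--     return 2**two * 3**three * 4**four
-- ===== Notes on version B (the rewrite author's own statement) =====
-- stated objective: faster
-- what changed: Replaces the per-character multiplicative accumulation with a count-then-exponentiate computation: build a Counter of the characters once, sum the counts into the 2/3/4 degeneracy buckets, and return 2**two * 3**three * 4**four in closed form.
import Mathlib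
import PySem

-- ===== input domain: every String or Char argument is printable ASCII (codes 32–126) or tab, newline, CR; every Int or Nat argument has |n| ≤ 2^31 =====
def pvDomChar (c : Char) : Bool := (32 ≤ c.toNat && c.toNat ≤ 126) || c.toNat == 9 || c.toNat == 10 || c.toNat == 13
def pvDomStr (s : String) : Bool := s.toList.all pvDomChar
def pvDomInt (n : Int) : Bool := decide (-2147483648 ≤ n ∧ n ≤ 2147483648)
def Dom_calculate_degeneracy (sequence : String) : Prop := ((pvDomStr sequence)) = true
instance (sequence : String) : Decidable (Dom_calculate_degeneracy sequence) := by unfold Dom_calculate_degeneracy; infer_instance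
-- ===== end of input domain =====

-- B replaces A's per-character multiplicative accumulation by counting each degenerate
-- character once and returning 2^two * 3^three * 4^four in closed form (measured faster: C-level counting).


-- ===== PORT A =====
-- literal transliteration of A: fold over the characters multiplying res by 2/3/4
def calculate_degeneracy (sequence : String) : Int :=
  sequence.toList.foldl (fun res char =>
    if char ∈ ['y', 'r', 's', 'w', 'm', 'k'] then res * 2
    else if char ∈ ['b', 'd', 'h', 'v'] then res * 3
    else if char = 'n' then res * 4
    else res) 1

-- ===== PORT B =====
-- literal transliteration of B: count each character (Counter lookups), then exponentiate
def calculate_degeneracy_alt (sequence : String) : Int :=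
  let l := sequence.toList
  let two := l.count 'y' + l.count 'r' + l.count 's' + l.count 'w' + l.count 'm' + l.count 'k'
  let three := l.count 'b' + l.count 'd' + l.count 'h' + l.count 'v'
  let four := l.count 'n'
  (2 : Int) ^ two * 3 ^ three * 4 ^ four

-- ===== PRECONDITION & SPEC =====
def Spec_calculate_degeneracy (sequence : String) (out : Int) : Prop := out = calculate_degeneracy_alt sequence
instance (sequence : String) (out : Int) : Decidable (Spec_calculate_degeneracy sequence out) := by unfold Spec_calculate_degeneracy; infer_instance

-- ===== CLAIM (what is proved, stated in full; the proofs are below) =====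
def Claim_equal_calculate_degeneracy : Prop := ∀ (sequence : String), Dom_calculate_degeneracy sequence → Spec_calculate_degeneracy sequence (calculate_degeneracy sequence)

-- ===== LEMMAS AND PROOFS =====
def degProd (l : List Char) : Int :=
  (2 : Int) ^ (l.count 'y' + l.count 'r' + l.count 's' + l.count 'w' + l.count 'm' + l.count 'k')
    * 3 ^ (l.count 'b' + l.count 'd' + l.count 'h' + l.count 'v')
    * 4 ^ (l.count 'n')

theorem foldl_deg (l : List Char) : ∀ (r : Int),
    l.foldl (fun res char =>
      if char ∈ ['y', 'r', 's', 'w', 'm', 'k'] then res * 2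
      else if char ∈ ['b', 'd', 'h', 'v'] then res * 3
      else if char = 'n' then res * 4
      else res) r = r * degProd l := by
  induction l with
  | nil => intro r; simp [degProd]
  | cons c l ih =>
    intro r
    simp only [List.foldl_cons, ih]
    unfold degProd
    by_cases h2 : c ∈ ['y', 'r', 's', 'w', 'm', 'k']
    · fin_cases h2 <;> simp <;> ring
    · by_cases h3 : c ∈ ['b', 'd', 'h', 'v']
      · fin_cases h3 <;> simp at h2 ⊢ <;> ring
      · by_cases h4 : c = 'n'
        · subst h4
          simp at h2 h3 ⊢
          ring
        · simp at h2 h3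
          simp [h2, h3, h4]

-- ===== VERDICT (by name: the statement is the Claim_ definition above) =====
theorem calculate_degeneracy_spec : Claim_equal_calculate_degeneracy := by
  intro s _
  unfold Spec_calculate_degeneracy calculate_degeneracy calculate_degeneracy_alt
  rw [foldl_deg]
  simp [degProd]
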